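-- pv_equiv track=rewrite | github.com/blockhead22/aether-core | aether/memory/auto_ingest.py | _is_inside_question
-- ===== SOURCE A (Python) =====
-- _INTERROGATIVE_OPENERS = (
--     "does ", "do ", "did ", "is ", "are ", "was ", "were ",
--     "am ", "can ", "could ", "will ", "would ", "should ",
--     "shall ", "may ", "might ", "must ", "has ", "have ", "had ",
--     "why ", "how ", "what ", "when ", "where ", "who ", "whom ",
--     "whose ", "which ",
-- )
--
-- def _is_inside_question(text: str, match_start: int) -> bool:
--     """True if the match position is inside an interrogative sentence.
--
--     Walks back from match_start to the previous sentence break, then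
--     checks whether the carrying sentence opens with a question word
--     or terminates on `?`.
--     """
--     sentence_start = 0
--     for i in range(match_start, 0, -1):
--         if text[i - 1] in ".!?\n":
--             sentence_start = i
--             break
--     sentence_end = len(text)
--     for i in range(match_start, len(text)):
--         if text[i] in ".!?\n":
--             sentence_end = i + 1
--             break
--     sentence = text[sentence_start:sentence_end].strip().lower()
--     if sentence.endswith("?"):
--         return True
--     return sentence.startswith(_INTERROGATIVE_OPENERS)
-- ===== SOURCE B (Python) =====
-- _INTERROGATIVE_OPENERS = (
--     "does ", "do ", "did ", "is ", "are ", "was ", "were ",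
--     "am ", "can ", "could ", "will ", "would ", "should ",
--     "shall ", "may ", "might ", "must ", "has ", "have ", "had ",
--     "why ", "how ", "what ", "when ", "where ", "who ", "whom ",
--     "whose ", "which ",
-- )
--
--
-- def _is_inside_question(text: str, match_start: int) -> bool:
--     """One forward segmentation pass: collect all sentence spans, then
--     look up the span holding match_start (first span whose end exceeds
--     it, else the final span)."""
--     spans = []
--     prev = 0
--     for i, ch in enumerate(text):
--         if ch in ".!?\n":
--             spans.append((prev, i + 1))
--             prev = i + 1
--     spans.append((prev, len(text)))
--     for start, end in spans:
--         if end > match_start: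
--             break
--     sentence = text[start:end].strip().lower()
--     return sentence.endswith("?") or sentence.startswith(_INTERROGATIVE_OPENERS)
-- ===== Notes on version B (the rewrite author's own statement) =====
-- stated objective: alternative
-- what changed: Replaces A's two targeted bidirectional scans around match_start with a single forward segmentation pass that collects all sentence spans as (start,end) pairs and then selects the first span whose end exceeds match_start (defaulting to the last).
-- outside the precondition, e.g. on _is_inside_question('a?', -1): A returns False, B returns True; on _is_inside_question('abc', 9): A raises IndexError, B returns False
import Mathlib
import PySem

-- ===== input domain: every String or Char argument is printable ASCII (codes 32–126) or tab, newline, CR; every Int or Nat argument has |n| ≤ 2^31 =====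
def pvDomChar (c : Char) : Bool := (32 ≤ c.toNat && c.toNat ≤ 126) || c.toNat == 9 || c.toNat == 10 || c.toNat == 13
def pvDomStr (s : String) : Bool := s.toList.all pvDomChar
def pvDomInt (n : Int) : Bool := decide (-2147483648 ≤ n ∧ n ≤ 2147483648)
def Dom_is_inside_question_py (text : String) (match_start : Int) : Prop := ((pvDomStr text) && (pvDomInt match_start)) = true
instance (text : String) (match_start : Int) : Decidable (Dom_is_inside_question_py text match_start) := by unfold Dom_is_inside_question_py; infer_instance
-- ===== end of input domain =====

-- B replaces A's two targeted bidirectional scans around match_start with one forward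
-- segmentation pass (collect every sentence span, then pick the span holding match_start);
-- same cost, alternative algorithm.

def pvDelim (c : Char) : Bool := c = '.' || c = '!' || c = '?' || c = '\n'

def pvOpeners : List (List Char) :=
  ["does ", "do ", "did ", "is ", "are ", "was ", "were ",
   "am ", "can ", "could ", "will ", "would ", "should ",
   "shall ", "may ", "might ", "must ", "has ", "have ", "had ",
   "why ", "how ", "what ", "when ", "where ", "who ", "whom ",
   "whose ", "which "].map String.toList

-- ===== PORT A =====
-- `for i in range(match_start, 0, -1): if text[i-1] in ".!?\n": sentence_start = i; break`
-- (recursion over the range list; text[i-1] read with pyGet?, so a negative index wraps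
-- exactly as in Python; `none` is Python's IndexError — excluded by Pre_, the loop skips)
def pvBackLoopA (cs : List Char) : List Int → Int
  | [] => 0
  | i :: rest =>
    match PySem.List.pyGet? cs (i - 1) with
    | some c => if pvDelim c then i else pvBackLoopA cs rest
    | none => pvBackLoopA cs rest

-- `for i in range(match_start, len(text)): if text[i] in ".!?\n": sentence_end = i+1; break`
-- (same convention: pyGet? wraps a negative i, `none` = IndexError, excluded by Pre_)
def pvFwdLoopA (cs : List Char) (len : Int) : List Int → Int
  | [] => len
  | i :: rest =>
    match PySem.List.pyGet? cs i with
    | some c => if pvDelim c then i + 1 else pvFwdLoopA cs len rest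
    | none => pvFwdLoopA cs len rest

def is_inside_question_py (text : String) (match_start : Int) : Bool :=
  let cs := text.toList
  let sentence_start := pvBackLoopA cs (PySem.List.pyRange match_start 0 (-1))
  let sentence_end := pvFwdLoopA cs (cs.length : Int) (PySem.List.pyRange match_start (cs.length : Int) 1)
  let sentence := PySem.Chars.lower (PySem.Chars.strip
    (PySem.List.slice cs (some sentence_start) (some sentence_end)))
  if PySem.Chars.endswith sentence ['?'] then true
  else pvOpeners.any (fun o => PySem.Chars.startswith sentence o)

-- ===== PORT B =====
-- `for i, ch in enumerate(text): if ch in ".!?\n": spans.append((prev, i+1)); prev = i+1`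
-- split into the delimiter scan (pvDelimPos) and the span builder (pvSpans) over the same state
def pvDelimPos : List Char → Nat → List Nat
  | [], _ => []
  | c :: r, i => if pvDelim c then i :: pvDelimPos r (i + 1) else pvDelimPos r (i + 1)

def pvSpans : List Nat → Nat → Nat → List (Nat × Nat)
  | [], prev, len => [(prev, len)]
  | p :: rest, prev, len => (prev, p + 1) :: pvSpans rest (p + 1) len

-- `for start, end in spans: if end > match_start: break`  (first hit, else the last span)
def pvPickSpan (ms : Int) : List (Nat × Nat) → Nat × Nat
  | [] => (0, 0)  -- unreachable: pvSpans is never empty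
  | sp :: rest =>
    if ms < (sp.2 : Int) then sp
    else match rest with
         | [] => sp
         | _ :: _ => pvPickSpan ms rest

def is_inside_question_py_alt (text : String) (match_start : Int) : Bool :=
  let cs := text.toList
  let sp := pvPickSpan match_start (pvSpans (pvDelimPos cs 0) 0 cs.length)
  let sentence := PySem.Chars.lower (PySem.Chars.strip
    (PySem.List.slice cs (some (sp.1 : Int)) (some (sp.2 : Int))))
  if PySem.Chars.endswith sentence ['?'] then true
  else pvOpeners.any (fun o => PySem.Chars.startswith sentence o)

-- ===== PRECONDITION & SPEC =====
-- Pre_ excludes match_start above len(text) or below -len(text), where A raises IndexError,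
-- and those negative match_start (positions outside the natural 0..len range of match offsets)
-- for which the suffix text[match_start:] that A's forward scan reads by Python's
-- negative-index wraparound contains a sentence delimiter; negative positions with a
-- delimiter-free suffix stay inside (A and B provably agree there).
def Pre_is_inside_question_py (text : String) (match_start : Int) : Prop :=
  -(PySem.Str.len text : Int) ≤ match_start ∧ match_start ≤ (PySem.Str.len text : Int) ∧
  (0 ≤ match_start ∨
    (PySem.List.slice text.toList (some match_start) none).all (fun c => !pvDelim c) = true)
instance (text : String) (match_start : Int) : Decidable (Pre_is_inside_question_py text match_start) := by
  unfold Pre_is_inside_question_py; infer_instance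

def pvWitness_is_inside_question_py : String × Int := ("Is it hot? Yes.", 3)

def Spec_is_inside_question_py (text : String) (match_start : Int) (out : Bool) : Prop := out = is_inside_question_py_alt text match_start
instance (text : String) (match_start : Int) (out : Bool) : Decidable (Spec_is_inside_question_py text match_start out) := by unfold Spec_is_inside_question_py; infer_instance

-- ===== CLAIM (what is proved, stated in full; the proofs are below) =====
def Claim_equal_is_inside_question_py : Prop := ∀ (text : String) (match_start : Int), Dom_is_inside_question_py text match_start → Pre_is_inside_question_py text match_start → Spec_is_inside_question_py text match_start (is_inside_question_py text match_start)

-- ===== LEMMAS AND PROOFS =====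

-- Nat-indexed views of A's two scans (proof helpers only)
def pvBackLoopN (cs : List Char) : Nat → Nat
  | 0 => 0
  | i + 1 => match cs[i]? with
    | some c => if pvDelim c then i + 1 else pvBackLoopN cs i
    | none => pvBackLoopN cs i

def pvFwdLoopN : List Char → Nat → Nat → Nat
  | [], _, len => len
  | c :: r, i, len => if pvDelim c then i + 1 else pvFwdLoopN r (i + 1) len

def pvPickSpanN (ms : Nat) : List (Nat × Nat) → Nat × Nat
  | [] => (0, 0)
  | sp :: rest =>
    if ms < sp.2 then sp
    else match rest with
         | [] => sp
         | _ :: _ => pvPickSpanN ms rest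

theorem pvDelimPos_lb : ∀ (r : List Char) (i p : Nat), p ∈ pvDelimPos r i → i ≤ p ∧ p < i + r.length := by
  intro r
  induction r with
  | nil => intro i p h; simp [pvDelimPos] at h
  | cons c r ih =>
    intro i p h
    simp only [pvDelimPos] at h
    split at h
    · rcases List.mem_cons.1 h with rfl | h
      · simp
      · have := ih (i+1) p h; simp; omega
    · have := ih (i+1) p h; simp; omega

theorem pvDelimPos_pairwise : ∀ (r : List Char) (i : Nat), List.Pairwise (· < ·) (pvDelimPos r i) := by
  intro r
  induction r with
  | nil => intro i; simp [pvDelimPos]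
  | cons c r ih =>
    intro i
    simp only [pvDelimPos]
    split
    · exact List.Pairwise.cons (fun p hp => by have := pvDelimPos_lb _ _ _ hp; omega) (ih (i+1))
    · exact ih (i+1)

theorem pvDelimPos_append : ∀ (xs ys : List Char) (i : Nat),
    pvDelimPos (xs ++ ys) i = pvDelimPos xs i ++ pvDelimPos ys (i + xs.length) := by
  intro xs
  induction xs with
  | nil => intro ys i; simp [pvDelimPos]
  | cons c r ih =>
    intro ys i
    simp only [List.cons_append, pvDelimPos, ih, List.length_cons]
    split <;> simp <;> ring_nf

theorem pvDelimPos_take : ∀ (r : List Char) (m i : Nat),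
    pvDelimPos (r.take m) i = (pvDelimPos r i).filter (fun p => decide (p < i + m)) := by
  intro r
  induction r with
  | nil => intro m i; simp [pvDelimPos]
  | cons c r ih =>
    intro m i
    cases m with
    | zero =>
      have h0 : pvDelimPos (List.take 0 (c :: r)) i = [] := rfl
      rw [h0]
      symm
      rw [List.filter_eq_nil_iff]
      intro p hp
      have := pvDelimPos_lb _ _ _ hp
      simp only [decide_eq_true_eq]
      omega
    | succ m =>
      simp only [List.take_succ_cons, pvDelimPos]
      split
      · simp only [List.filter_cons]
        have : (fun p => decide (p < i + (m+1))) i = true := by simp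
        rw [ih m (i+1)]
        simp only [this, if_pos]
        congr 1
        apply List.filter_congr
        intro p hp
        have := pvDelimPos_lb _ _ _ hp
        simp; omega
      · rw [ih m (i+1)]
        apply List.filter_congr
        intro p hp
        have := pvDelimPos_lb _ _ _ hp
        simp; omega

theorem pvDelimPos_drop : ∀ (r : List Char) (m i : Nat),
    pvDelimPos (r.drop m) (i + m) = (pvDelimPos r i).filter (fun p => decide (i + m ≤ p)) := by
  intro r
  induction r with
  | nil => intro m i; simp [pvDelimPos]
  | cons c r ih =>
    intro m i
    cases m with
    | zero =>
      simp only [List.drop_zero, Nat.add_zero]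
      symm
      rw [List.filter_eq_self]
      intro p hp
      have := pvDelimPos_lb _ _ _ hp
      simp only [decide_eq_true_eq]
      omega
    | succ m =>
      simp only [List.drop_succ_cons, pvDelimPos]
      have h1 : i + (m + 1) = (i + 1) + m := by omega
      rw [h1, ih m (i+1)]
      split
      · simp only [List.filter_cons]
        rw [if_neg (by simp only [decide_eq_true_eq]; omega)]
      · rfl

theorem pvFwdLoopN_eq : ∀ (rest : List Char) (i len : Nat),
    pvFwdLoopN rest i len = ((pvDelimPos rest i).head?.elim len (· + 1)) := by
  intro rest
  induction rest with
  | nil => intro i len; simp [pvFwdLoopN, pvDelimPos]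
  | cons c r ih =>
    intro i len
    simp only [pvFwdLoopN, pvDelimPos]
    split
    · simp
    · exact ih (i+1) len

theorem pvBackLoopN_take : ∀ (ms : Nat) (cs : List Char), ms ≤ cs.length →
    pvBackLoopN cs ms = pvBackLoopN (cs.take ms) ms := by
  intro ms
  induction ms with
  | zero => intro cs _; rfl
  | succ m ih =>
    intro cs h
    simp only [pvBackLoopN]
    have hsame : (cs.take (m+1))[m]? = cs[m]? := by
      rw [List.getElem?_take]
      simp
    rw [hsame]
    have h2 : pvBackLoopN cs m = pvBackLoopN (cs.take m) m := ih cs (by omega)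
    have h3 : pvBackLoopN (cs.take (m+1)) m = pvBackLoopN (cs.take m) m := by
      rw [ih (cs.take (m+1)) (by simp; omega), List.take_take]
      simp
    cases hcm : cs[m]? with
    | none => simp [h2, h3]
    | some c => split <;> simp [h2, h3]

theorem pvBackLoopN_full : ∀ (cs : List Char),
    pvBackLoopN cs cs.length = ((pvDelimPos cs 0).getLast?.elim 0 (· + 1)) := by
  intro cs
  induction cs using List.reverseRecOn with
  | nil => rfl
  | append_singleton ys c ih =>
    have hlen : (ys ++ [c]).length = ys.length + 1 := by simp
    rw [hlen]
    simp only [pvBackLoopN]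
    have hg : (ys ++ [c])[ys.length]? = some c := by
      simp
    rw [hg]
    rw [pvDelimPos_append ys [c] 0]
    simp only [pvDelimPos, Nat.zero_add]
    split
    · simp
    · simp only [List.append_nil]
      rw [pvBackLoopN_take ys.length (ys ++ [c]) (by simp), List.take_left']
      · exact ih
      · rfl

theorem pvBackLoopN_eq (cs : List Char) (ms : Nat) (h : ms ≤ cs.length) :
    pvBackLoopN cs ms = (((pvDelimPos cs 0).filter (fun p => decide (p < ms))).getLast?.elim 0 (· + 1)) := by
  rw [pvBackLoopN_take ms cs h]
  have hfull := pvBackLoopN_full (cs.take ms)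
  rw [show (cs.take ms).length = ms from by simp [h]] at hfull
  rw [hfull, pvDelimPos_take cs ms 0]
  congr 2
  apply List.filter_congr
  intro p hp
  simp only [decide_eq_decide]
  omega

theorem pvSpans_ne_nil (ps : List Nat) (prev len : Nat) : pvSpans ps prev len ≠ [] := by
  cases ps <;> simp [pvSpans]

theorem pvPickN_eq : ∀ (ps : List Nat) (prev len ms : Nat), prev ≤ ms →
    List.Pairwise (· < ·) ps → (∀ p ∈ ps, prev ≤ p) →
    pvPickSpanN ms (pvSpans ps prev len) =
      (((ps.filter (fun p => decide (p < ms))).getLast?.elim prev (· + 1)),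
       ((ps.filter (fun p => decide (ms ≤ p))).head?.elim len (· + 1))) := by
  intro ps
  induction ps with
  | nil =>
    intro prev len ms hprev _ _
    simp only [pvSpans, pvPickSpanN, List.filter_nil, List.getLast?_nil, List.head?_nil,
      Option.elim_none]
    split <;> rfl
  | cons p rest ih =>
    intro prev len ms hprev hpw hlb
    have hpw' := (List.pairwise_cons.1 hpw).2
    have hplt := (List.pairwise_cons.1 hpw).1
    simp only [pvSpans, pvPickSpanN]
    by_cases hc : ms < p + 1
    · rw [if_pos hc]
      have hfilt1 : List.filter (fun q => decide (q < ms)) (p :: rest) = [] := by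
        rw [List.filter_eq_nil_iff]
        intro q hq
        simp only [decide_eq_true_eq]
        rcases List.mem_cons.1 hq with rfl | hq
        · omega
        · have := hplt q hq; omega
      have hfilt2 : List.filter (fun q => decide (ms ≤ q)) (p :: rest) =
          p :: List.filter (fun q => decide (ms ≤ q)) rest := by
        simp only [List.filter_cons]
        rw [if_pos (by simp only [decide_eq_true_eq]; omega)]
      rw [hfilt1, hfilt2]
      rfl
    · rw [if_neg hc]
      have hrec : (match pvSpans rest (p+1) len with
          | [] => (prev, p + 1)
          | _ :: _ => pvPickSpanN ms (pvSpans rest (p+1) len)) = pvPickSpanN ms (pvSpans rest (p+1) len) := by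
        cases hs : pvSpans rest (p+1) len with
        | nil => exact absurd hs (pvSpans_ne_nil _ _ _)
        | cons a b => rfl
      rw [hrec, ih (p+1) len ms (by omega) hpw' (fun q hq => by have := hplt q hq; omega)]
      have hfilt1 : List.filter (fun q => decide (q < ms)) (p :: rest) =
          p :: List.filter (fun q => decide (q < ms)) rest := by
        simp only [List.filter_cons]
        rw [if_pos (by simp only [decide_eq_true_eq]; omega)]
      have hfilt2 : List.filter (fun q => decide (ms ≤ q)) (p :: rest) =
          List.filter (fun q => decide (ms ≤ q)) rest := by
        simp only [List.filter_cons]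
        rw [if_neg (by simp only [decide_eq_true_eq]; omega)]
      rw [hfilt1, hfilt2]
      congr 1
      cases hfr : List.filter (fun q => decide (q < ms)) rest with
      | nil => simp
      | cons a b =>
        rw [List.getLast?_cons_cons]
        cases hg : (a :: b).getLast? with
        | none => simp [List.getLast?_eq_none_iff] at hg
        | some x => rfl

-- range(a, 0, -1) bridges (PySem.List.pyRange with step -1 has no cons/nil lemmas in the prelude)
theorem pvRangeDown_nil (a b : Int) (h : a ≤ b) : PySem.List.pyRange a b (-1) = [] := by
  simp only [PySem.List.pyRange]
  norm_num
  intro hb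
  omega

theorem pvRangeDown_cons (a b : Int) (h : b < a) :
    PySem.List.pyRange a b (-1) = a :: PySem.List.pyRange (a - 1) b (-1) := by
  simp only [PySem.List.pyRange]
  norm_num
  rw [if_pos h]
  by_cases h2 : b < a - 1
  · rw [if_pos h2]
    have e3 : (a - b).toNat = (a - 1 - b).toNat + 1 := by omega
    rw [e3, List.range_succ_eq_map]
    simp only [List.map_cons, List.map_map]
    congr 1
    · norm_num
    · apply List.map_congr_left
      intro k _
      simp only [Function.comp_apply, Nat.succ_eq_add_one]
      push_cast
      ring
  · rw [if_neg h2]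
    have e3 : (a - b).toNat = 1 := by omega
    rw [e3]
    simp

theorem pvBackLoopA_eq_nat (cs : List Char) : ∀ (n : Nat),
    pvBackLoopA cs (PySem.List.pyRange (n : Int) 0 (-1)) = (pvBackLoopN cs n : Int) := by
  intro n
  induction n with
  | zero =>
    rw [show ((0 : Nat) : Int) = (0 : Int) from rfl, pvRangeDown_nil 0 0 le_rfl]
    rfl
  | succ m ih =>
    rw [pvRangeDown_cons ((m + 1 : Nat) : Int) 0 (by positivity)]
    simp only [pvBackLoopA]
    rw [show ((m + 1 : Nat) : Int) - 1 = ((m : Nat) : Int) from by push_cast; ring]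
    rw [PySem.List.pyGet?_natCast]
    simp only [pvBackLoopN]
    cases hm : cs[m]? with
    | none => exact ih
    | some c =>
      by_cases hd : pvDelim c = true
      · simp only [hd, if_true]
      · simp only [hd, if_false, Bool.false_eq_true]
        exact ih

theorem pvFwdLoopA_eq_nat (cs : List Char) : ∀ (k : Nat) (n : Nat), n ≤ cs.length → cs.length - n = k →
    pvFwdLoopA cs (cs.length : Int) (PySem.List.pyRange (n : Int) (cs.length : Int) 1) =
      (pvFwdLoopN (cs.drop n) n cs.length : Int) := by
  intro k
  induction k with
  | zero =>
    intro n hle hk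
    have hn : n = cs.length := by omega
    rw [hn]
    rw [show PySem.List.pyRange ((cs.length : Nat) : Int) ((cs.length : Nat) : Int) 1 = [] from by
      rw [PySem.List.pyRange_one]; simp]
    rw [List.drop_length]
    rfl
  | succ k ih =>
    intro n hle hk
    have hlt : n < cs.length := by omega
    rw [PySem.List.pyRange_one_cons (by exact_mod_cast hlt)]
    simp only [pvFwdLoopA]
    rw [PySem.List.pyGet?_natCast]
    have hget : cs[n]? = some cs[n] := List.getElem?_eq_getElem hlt
    rw [hget]
    have hdrop : cs.drop n = cs[n] :: cs.drop (n + 1) := List.drop_eq_getElem_cons hlt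
    rw [hdrop]
    simp only [pvFwdLoopN]
    by_cases hd : pvDelim cs[n] = true
    · simp only [hd, if_true]; push_cast; ring
    · simp only [hd, if_false, Bool.false_eq_true]
      rw [show ((n : Nat) : Int) + 1 = ((n + 1 : Nat) : Int) from by push_cast; ring]
      exact ih (n + 1) (by omega) (by omega)

theorem pvFwdLoopA_neg (cs : List Char) : ∀ (k : Nat), k ≤ cs.length →
    (cs.drop (cs.length - k)).all (fun c => !pvDelim c) = true →
    pvFwdLoopA cs (cs.length : Int) (PySem.List.pyRange (-(k : Int)) (cs.length : Int) 1) =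
      pvFwdLoopA cs (cs.length : Int) (PySem.List.pyRange 0 (cs.length : Int) 1) := by
  intro k
  induction k with
  | zero => intro _ _; norm_num
  | succ k ih =>
    intro hle hall
    rw [PySem.List.pyRange_one_cons (by omega : -((k + 1 : Nat) : Int) < (cs.length : Int))]
    simp only [pvFwdLoopA]
    rw [PySem.List.pyGet?_neg_natCast cs (k + 1) (by omega) hle]
    have hget : cs[cs.length - (k + 1)]? = some cs[cs.length - (k + 1)] :=
      List.getElem?_eq_getElem (by omega)
    rw [hget]
    have hmem : cs[cs.length - (k + 1)] ∈ cs.drop (cs.length - (k + 1)) := by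
      rw [List.drop_eq_getElem_cons (by omega : cs.length - (k + 1) < cs.length)]
      exact List.mem_cons_self
    have hnd : pvDelim cs[cs.length - (k + 1)] = false := by
      have := (List.all_eq_true.1 hall) _ hmem
      simpa using this
    simp only [hnd, Bool.false_eq_true, if_false]
    have hstep : -((k + 1 : Nat) : Int) + 1 = -((k : Nat) : Int) := by push_cast; ring
    rw [hstep]
    apply ih (by omega)
    have : cs.drop (cs.length - k) ⊆ cs.drop (cs.length - (k + 1)) := by
      have h2 : cs.drop (cs.length - k) = (cs.drop (cs.length - (k + 1))).drop 1 := by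
        rw [List.drop_drop]
        congr 1
        omega
      rw [h2]
      exact List.drop_subset _ _
    rw [List.all_eq_true] at hall ⊢
    intro c hc
    exact hall c (this hc)

theorem pvPickSpan_eq_nat (ms : Int) (h : 0 ≤ ms) :
    ∀ (l : List (Nat × Nat)), pvPickSpan ms l = pvPickSpanN ms.toNat l := by
  intro l
  induction l with
  | nil => rfl
  | cons sp rest ih =>
    simp only [pvPickSpan, pvPickSpanN]
    have hc : (ms < (sp.2 : Int)) ↔ (ms.toNat < sp.2) := by omega
    by_cases hx : ms < (sp.2 : Int)
    · rw [if_pos hx, if_pos (hc.1 hx)]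
    · rw [if_neg hx, if_neg (fun hn => hx (hc.2 hn))]
      cases rest with
      | nil => rfl
      | cons a b => exact ih

theorem pvPickSpan_neg (ms : Int) (h : ms < 0) (ps : List Nat) (prev len : Nat) :
    pvPickSpan ms (pvSpans ps prev len) =
      (prev, (ps.head?.elim len (· + 1))) := by
  cases ps with
  | nil =>
    simp only [pvSpans, pvPickSpan]
    rw [if_pos (by omega : ms < ((len : Nat) : Int))]
    rfl
  | cons p rest =>
    simp only [pvSpans, pvPickSpan]
    rw [if_pos (by omega : ms < ((p + 1 : Nat) : Int))]
    rfl

theorem pvPair_eq (cs : List Char) (n : Nat) (h : n ≤ cs.length) :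
    pvPickSpanN n (pvSpans (pvDelimPos cs 0) 0 cs.length) =
      (pvBackLoopN cs n, pvFwdLoopN (cs.drop n) n cs.length) := by
  rw [pvPickN_eq (pvDelimPos cs 0) 0 cs.length n (Nat.zero_le _) (pvDelimPos_pairwise cs 0)
    (fun p _ => Nat.zero_le _)]
  have hd := pvDelimPos_drop cs n 0
  simp only [Nat.zero_add] at hd
  rw [pvBackLoopN_eq cs n h, pvFwdLoopN_eq, hd]

-- ===== VERDICT (by name: the statement is the Claim_ definition above) =====
theorem is_inside_question_py_spec : Claim_equal_is_inside_question_py := by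
  intro text match_start _dom hpre
  unfold Spec_is_inside_question_py
  obtain ⟨hlow, hhigh, hsign⟩ := hpre
  simp only [is_inside_question_py, is_inside_question_py_alt]
  set cs := text.toList with hcs
  have hlen : (PySem.Str.len text : Int) = (cs.length : Int) := by
    simp [PySem.Str.len_eq, hcs]
  rw [hlen] at hlow hhigh
  by_cases h0 : 0 ≤ match_start
  · -- match_start in 0..len(text): both sides select the same (start, end) pair
    have hle : match_start.toNat ≤ cs.length := by omega
    have hn : match_start = ((match_start.toNat : Nat) : Int) := by omega
    rw [hn]
    rw [pvBackLoopA_eq_nat cs match_start.toNat]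
    rw [pvFwdLoopA_eq_nat cs (cs.length - match_start.toNat) match_start.toNat hle rfl]
    rw [pvPickSpan_eq_nat _ (by positivity)]
    rw [Int.toNat_natCast]
    rw [pvPair_eq cs match_start.toNat hle]
  · -- negative match_start with a delimiter-free wrapped suffix: both sides give the first sentence
    have hneg : match_start < 0 := by omega
    have hclean := hsign.resolve_left h0
    set k : Nat := (-match_start).toNat with hk
    have hkpos : 0 < k := by omega
    have hkle : k ≤ cs.length := by omega
    have hms : match_start = -(k : Int) := by omega
    rw [hms]
    rw [hms, PySem.List.slice_from_neg_natCast cs k hkpos] at hclean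
    rw [pvRangeDown_nil (-(k : Int)) 0 (by omega)]
    rw [pvFwdLoopA_neg cs k hkle hclean]
    have h00 := pvFwdLoopA_eq_nat cs cs.length 0 (Nat.zero_le _) rfl
    simp only [Nat.cast_zero, List.drop_zero] at h00
    rw [h00]
    rw [pvFwdLoopN_eq cs 0 cs.length]
    rw [pvPickSpan_neg (-(k : Int)) (by omega) (pvDelimPos cs 0) 0 cs.length]
    rfl
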